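-- pv_equiv track=rewrite | github.com/sonaiso/Eqratech_Hussein_Hiyassat_Project | src/fvafk/c2b/syllabifier.py | segment_cv_strict
-- ===== SOURCE A (Python) =====
-- from typing import List, Tuple, Optional, NamedTuple
--
-- def segment_cv_strict(cv: str) -> Tuple[Optional[List[str]], Optional[str]]:
--     """
--     Strict CV segmentation.  Returns ``(syllable_patterns, error)``.
--
--     Unlike :func:`segment_cv_to_syllables`, this routine fails immediately
--     whenever it encounters a position that cannot start a valid syllable
--     (i.e. ``cv[i:i+2] != "CV"``) and also fails if the CV string is not
--     **fully consumed** by the produced syllable list.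
--
--     Error codes returned in the ``error`` slot:
--     - ``illegal_cv_sequence_at:<index>`` – position *i* is not the start of CV
--     - ``cv_not_fully_consumed:<leftover>`` – trailing characters remain after
--       last syllable
--
--     Returns ``([], None)`` for an empty string (consistent with
--     :func:`segment_cv_to_syllables`).
--     """
--     if not cv:
--         return [], None
--
--     syllables: List[str] = []
--     i = 0
--
--     while i < len(cv):
--         if i + 1 >= len(cv) or cv[i] != "C" or cv[i + 1] != "V":
--             return None, f"illegal_cv_sequence_at:{i}"
--
--         syll = "CV"
--         i += 2
--
--         if i < len(cv) and cv[i] == "V":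
--             syll = "CVV"
--             i += 1
--
--         c_start = i
--         while i < len(cv) and cv[i] == "C":
--             i += 1
--         c_count = i - c_start
--
--         if i >= len(cv):
--             coda = min(2, c_count)
--             if coda == 1:
--                 syll += "C"
--             elif coda == 2:
--                 syll += "CC"
--             syllables.append(syll)
--             break
--
--         coda = min(2, max(0, c_count - 1))
--         if coda == 1:
--             syll += "C"
--         elif coda == 2:
--             syll += "CC"
--
--         i = c_start + coda
--         syllables.append(syll)
--
--     # Full-consumption check
--     consumed = "".join(syllables)
--     if consumed != cv:
--         leftover = cv[len(consumed):]
--         return None, f"cv_not_fully_consumed:{leftover}"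
--
--     return syllables, None
-- ===== SOURCE B (Python) =====
-- from typing import List, Tuple, Optional
--
-- def segment_cv_strict(cv: str) -> Tuple[Optional[List[str]], Optional[str]]:
--     """Run-length based strict CV segmentation (same result as the index-scanning version)."""
--     if not cv:
--         return [], None
--     # run-length encode: scan each maximal block of a repeated character
--     runs: List[Tuple[str, int]] = []
--     i = 0
--     while i < len(cv):
--         j = i + 1
--         while j < len(cv) and cv[j] == cv[i]:
--             j += 1
--         runs.append((cv[i], j - i))
--         i = j
--     syllables: List[str] = []
--     pos = 0          # original character index of the current head run
--     j = 0            # index of the current head run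
--     head = runs[0]
--     while True:
--         ch, k = head
--         # a syllable must start with exactly one C followed by a V
--         if ch != 'C' or k != 1 or j + 1 >= len(runs) or runs[j + 1][0] != 'V':
--             return None, f"illegal_cv_sequence_at:{pos}"
--         m = runs[j + 1][1]
--         if m > 2:
--             # a third V can never be consumed: it fails as a syllable start
--             return None, f"illegal_cv_sequence_at:{pos + 3}"
--         syll = "C" + "V" * m
--         pos += 1 + m
--         if j + 2 >= len(runs):
--             syllables.append(syll)
--             return syllables, None
--         nch, nk = runs[j + 2]
--         if nch != 'C':
--             syllables.append(syll)
--             head = runs[j + 2]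
--             j += 2
--             continue
--         if j + 3 >= len(runs):
--             # final consonant run: the coda takes up to 2, the rest is leftover
--             if nk > 2:
--                 return None, f"cv_not_fully_consumed:{'C' * (nk - 2)}"
--             syllables.append(syll + "C" * min(2, nk))
--             return syllables, None
--         coda = min(2, nk - 1)    # interior run: leave at least one C as the next onset
--         syllables.append(syll + "C" * coda)
--         pos += coda
--         head = ('C', nk - coda)
--         j += 2
-- ===== Notes on version B (the rewrite author's own statement) =====
-- stated objective: alternative
-- what changed: A scans the CV string character-by-character with an index cursor and an inner consonant-counting while loop; B first run-length-encodes the string into (char, runLength) blocks and then builds syllables by consuming whole runs (onset run, nucleus run, coda taken from the following C-run), deciding errors and leftovers from run lengths.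
import Mathlib
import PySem

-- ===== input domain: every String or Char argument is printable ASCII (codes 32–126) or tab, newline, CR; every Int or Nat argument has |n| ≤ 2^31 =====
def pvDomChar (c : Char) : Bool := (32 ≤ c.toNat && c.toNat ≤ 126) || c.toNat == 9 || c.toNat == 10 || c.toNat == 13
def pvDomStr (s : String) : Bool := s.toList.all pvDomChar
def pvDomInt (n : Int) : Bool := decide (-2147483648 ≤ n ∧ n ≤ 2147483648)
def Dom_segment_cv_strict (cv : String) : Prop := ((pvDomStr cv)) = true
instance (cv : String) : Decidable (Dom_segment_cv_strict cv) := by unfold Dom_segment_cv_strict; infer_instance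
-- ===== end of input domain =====

-- B replaces A's index-scanning loop by a run-length-encoding pass followed by a loop over the
-- (char, runLength) list; both programs are total and return the same value.

-- ===== PORT A =====
-- A's inner scan `while i < len(cv) and cv[i] == "C": i += 1` (returns the final i).
def countC (s : List Char) (i : Nat) : Nat :=
  if h : i < s.length ∧ s.getD i ' ' = 'C' then countC s (i + 1) else i
termination_by s.length - i
decreasing_by omega

-- A's main `while` loop; `Sum.inl` = normal exit (break, or loop condition false), `Sum.inr` = error
-- return.  `cv[i]` is read as `s.getD i ' '`: every read is guarded by the same range test that
-- Python's short-circuiting performs, so the default is never observable.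
def loopA (s : List Char) (i : Nat) (sylls : List String) : List String ⊕ String :=
  if _h1 : i < s.length then
    if s.length ≤ i + 1 ∨ ¬s.getD i ' ' = 'C' ∨ ¬s.getD (i + 1) ' ' = 'V' then
      Sum.inr ("illegal_cv_sequence_at:" ++ toString i)
    else
      -- syll = "CV"; i += 2; then the optional third V
      let syll := if i + 2 < s.length ∧ s.getD (i + 2) ' ' = 'V' then "CVV" else "CV"
      let cStart := if i + 2 < s.length ∧ s.getD (i + 2) ' ' = 'V' then i + 3 else i + 2
      let i2 := countC s cStart
      let cCount := i2 - cStart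
      if s.length ≤ i2 then
        let coda := min 2 cCount
        Sum.inl (sylls ++ [if coda = 1 then syll ++ "C" else if coda = 2 then syll ++ "CC" else syll])
      else
        -- Nat subtraction: `cCount - 1` is Python's `max(0, c_count - 1)`
        let coda := min 2 (cCount - 1)
        loopA s (cStart + coda) (sylls ++ [if coda = 1 then syll ++ "C" else if coda = 2 then syll ++ "CC" else syll])
  else Sum.inl sylls
termination_by s.length - i
decreasing_by
  split <;> omega

-- A's code after the loop: `consumed = "".join(syllables)` and the full-consumption check.
def finishA (cv : String) (r : List String ⊕ String) : Option (List String) × Option String :=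
  match r with
  | Sum.inr e => (none, some e)
  | Sum.inl sylls =>
    let consumed := PySem.Str.join "" sylls
    if consumed ≠ cv then
      (none, some ("cv_not_fully_consumed:" ++ PySem.Str.slice cv (some (PySem.Str.len consumed)) none))
    else (some sylls, none)

def segment_cv_strict (cv : String) : Option (List String) × Option String :=
  if cv = "" then (some [], none)
  else finishA cv (loopA cv.toList 0 [])

-- ===== PORT B =====
-- Source B's run-length pass: scan the maximal block of the leading character (Source B's inner `while`),
-- emit (char, blockLength), continue after the block.
def rleB (l : List Char) : List (Char × Nat) :=
  match l with
  | [] => []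
  | c :: rest =>
    (c, 1 + (rest.takeWhile (· == c)).length) :: rleB (rest.dropWhile (· == c))
termination_by l.length
decreasing_by
  simp only [List.length_cons]
  have := List.length_dropWhile_le (· == c) rest
  omega

-- Source B's loop over the run list: consume the onset run and the nucleus run, then assign a coda from
-- the following C-run (the partially consumed C-run is put back as the next head).
-- `String.ofList (List.replicate n c)` is Python's `c * n`.
def loopB : List (Char × Nat) → Nat → List String → Option (List String) × Option String
  | [], _, sylls => (some sylls, none)   -- unreachable: a nonempty cv yields a nonempty run list
  | (_, _) :: [], pos, _ =>
    (none, some ("illegal_cv_sequence_at:" ++ toString pos))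
  | (ch, k) :: (v, m) :: rest2, pos, sylls =>
    if ¬ch = 'C' ∨ ¬k = 1 ∨ ¬v = 'V' then
      (none, some ("illegal_cv_sequence_at:" ++ toString pos))
    else if 2 < m then
      (none, some ("illegal_cv_sequence_at:" ++ toString (pos + 3)))
    else
      match hr2 : rest2 with
      | [] => (some (sylls ++ ["C" ++ String.ofList (List.replicate m 'V')]), none)
      | (nch, nk) :: rest3 =>
        if ¬nch = 'C' then
          loopB rest2 (pos + 1 + m) (sylls ++ ["C" ++ String.ofList (List.replicate m 'V')])
        else
          match rest3 with
          | [] =>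
            if 2 < nk then
              (none, some ("cv_not_fully_consumed:" ++ String.ofList (List.replicate (nk - 2) 'C')))
            else
              (some (sylls ++ [("C" ++ String.ofList (List.replicate m 'V')) ++ String.ofList (List.replicate (min 2 nk) 'C')]), none)
          | _ :: _ =>
            let coda := min 2 (nk - 1)
            loopB (('C', nk - coda) :: rest3) (pos + 1 + m + coda)
              (sylls ++ [("C" ++ String.ofList (List.replicate m 'V')) ++ String.ofList (List.replicate coda 'C')])
termination_by runs _ _ => runs.length
decreasing_by
  all_goals simp_all [List.length_cons]
  all_goals omega

def segment_cv_strict_alt (cv : String) : Option (List String) × Option String :=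
  if cv = "" then (some [], none)
  else loopB (rleB cv.toList) 0 []

-- ===== PRECONDITION & SPEC =====
def Spec_segment_cv_strict (cv : String) (out : Option (List String) × Option String) : Prop := out = segment_cv_strict_alt cv
instance (cv : String) (out : Option (List String) × Option String) : Decidable (Spec_segment_cv_strict cv out) := by unfold Spec_segment_cv_strict; infer_instance

-- ===== CLAIM (what is proved, stated in full; the proofs are below) =====
def Claim_equal_segment_cv_strict : Prop := ∀ (cv : String), Dom_segment_cv_strict cv → Spec_segment_cv_strict cv (segment_cv_strict cv)

-- ===== LEMMAS AND PROOFS =====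
set_option maxHeartbeats 1000000

theorem toListC : ("C" : String).toList = ['C'] := by decide
theorem toListCC : ("CC" : String).toList = ['C', 'C'] := by decide

-- expansion of a run list back to characters, and well-formedness of a run list
def expandR (R : List (Char × Nat)) : List Char := R.flatMap fun r => List.replicate r.2 r.1

def ValidR : List (Char × Nat) → Prop
  | [] => True
  | r :: R => 1 ≤ r.2 ∧ (∀ r2 ∈ R.head?, r.1 ≠ r2.1) ∧ ValidR R

theorem expandR_cons (c : Char) (k : Nat) (R : List (Char × Nat)) :
    expandR ((c, k) :: R) = List.replicate k c ++ expandR R := by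
  simp [expandR]

theorem repl_succ_pred {c : Char} {k : Nat} (hk : 1 ≤ k) :
    List.replicate k c = c :: List.replicate (k - 1) c := by
  conv_lhs => rw [show k = (k - 1) + 1 from by omega]
  rw [List.replicate_succ]

theorem dropCons {s : List Char} {i : Nat} {c : Char} {t : List Char}
    (h : s.drop i = c :: t) :
    i < s.length ∧ s.getD i ' ' = c ∧ s.drop (i + 1) = t := by
  have hlen : (s.drop i).length = s.length - i := List.length_drop
  rw [h] at hlen
  refine ⟨by simp at hlen; omega, ?_, ?_⟩
  · have h0 : s[i]? = some c := by
      have h1 := @List.getElem?_drop _ s i 0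
      rw [h] at h1; simpa using h1.symm
    simp [List.getD_eq_getElem?_getD, h0]
  · have h2 : (s.drop i).drop 1 = s.drop (i + 1) := List.drop_drop
    rw [← h2, h]
    simp

theorem takeOfDrop {s u t : List Char} {i : Nat} (h : s.drop i = u ++ t) :
    s.take (i + u.length) = s.take i ++ u := by
  rw [List.take_add, h, List.take_left]

theorem countC_spec {s : List Char} :
    ∀ (k i : Nat) (t : List Char), s.drop i = List.replicate k 'C' ++ t →
      (t = [] ∨ ∃ c' t', t = c' :: t' ∧ c' ≠ 'C') → countC s i = i + k := by
  intro k
  induction k with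
  | zero =>
    intro i t h ht
    rw [countC]
    rw [List.replicate, List.nil_append] at h
    rcases ht with rfl | ⟨c', t', rfl, hc⟩
    · have hx : ¬ i < s.length := by
        have hlen : (s.drop i).length = s.length - i := List.length_drop
        rw [h] at hlen; simp at hlen; omega
      rw [dif_neg (fun hcon => hx hcon.1)]
      omega
    · obtain ⟨-, hg, -⟩ := dropCons h
      rw [dif_neg (fun hcon => hc (hg.symm.trans hcon.2))]
      omega
  | succ k ih =>
    intro i t h ht
    rw [List.replicate_succ, List.cons_append] at h
    obtain ⟨hlt, hg, hdrop⟩ := dropCons h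
    rw [countC, dif_pos ⟨hlt, hg⟩, ih (i + 1) t hdrop ht]
    omega

-- run-length encoding expands back to the input and is well-formed
theorem rleB_expand : ∀ l : List Char, expandR (rleB l) = l := by
  intro l
  induction l using rleB.induct with
  | case1 => simp [rleB, expandR]
  | case2 c rest ih =>
    rw [rleB, expandR_cons, ih]
    have ht : rest.takeWhile (· == c) = List.replicate (rest.takeWhile (· == c)).length c := by
      apply List.eq_replicate_of_mem
      intro b hb
      have hb2 := List.mem_takeWhile_imp hb
      simpa using hb2
    calc List.replicate (1 + (rest.takeWhile (· == c)).length) c ++ rest.dropWhile (· == c)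
        = c :: (List.replicate (rest.takeWhile (· == c)).length c ++ rest.dropWhile (· == c)) := by
          rw [Nat.add_comm, List.replicate_succ]; simp
      _ = c :: (rest.takeWhile (· == c) ++ rest.dropWhile (· == c)) := by rw [← ht]
      _ = c :: rest := by rw [List.takeWhile_append_dropWhile]

theorem rleB_head_ne {c : Char} {rest : List Char} {p : Char × Nat} :
    p ∈ (rleB (rest.dropWhile (· == c))).head? → p.1 ≠ c := by
  intro hp
  cases hd : rest.dropWhile (· == c) with
  | nil => rw [hd] at hp; simp [rleB] at hp
  | cons d t =>
    rw [hd] at hp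
    rw [rleB] at hp
    simp only [List.head?_cons, Option.mem_def, Option.some.injEq] at hp
    have hnd := List.head?_dropWhile_not (· == c) rest
    rw [hd] at hnd
    simp at hnd
    rw [← hp]
    simpa using hnd

theorem rleB_valid : ∀ l : List Char, ValidR (rleB l) := by
  intro l
  induction l using rleB.induct with
  | case1 => rw [rleB]; trivial
  | case2 c rest ih =>
    rw [rleB]
    refine ⟨by omega, ?_, ih⟩
    intro r2 hr2
    exact fun hc => rleB_head_ne hr2 (by rw [← hc])

-- `"".join(syllables)`, character level
theorem joinChars_flatten : ∀ L : List (List Char), PySem.Chars.join [] L = L.flatten := by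
  intro L
  induction L with
  | nil => simp [PySem.Chars.join_nil]
  | cons a t ih =>
    cases t with
    | nil => simp [PySem.Chars.join_singleton]
    | cons b t' =>
      rw [PySem.Chars.join_cons_cons]
      simp only [List.flatten_cons] at ih ⊢
      rw [ih]
      simp

theorem joinToList (L : List String) :
    (PySem.Str.join "" L).toList = (L.map String.toList).flatten := by
  rw [PySem.Str.toList_join]
  simpa using joinChars_flatten (L.map String.toList)

theorem flattenSnoc (sylls : List String) (x : String) :
    ((sylls ++ [x]).map String.toList).flatten = (sylls.map String.toList).flatten ++ x.toList := by
  simp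

-- the induction hypothesis threaded through the step lemma
def IHtype (cv : String) (n : Nat) : Prop :=
  ∀ n' < n, ∀ (pos' : Nat) (sylls' : List String) (R' : List (Char × Nat)),
    cv.toList.length - pos' = n' → ValidR R' →
    expandR R' = cv.toList.drop pos' →
    (sylls'.map String.toList).flatten = cv.toList.take pos' →
    finishA cv (loopA cv.toList pos' sylls') = loopB R' pos' sylls'

-- A's third-V dead end: after reading "CVV" with yet another V following, A's next loop iteration
-- fails at index pos+3 (matching B's early `m > 2` error).
theorem thirdV (cv : String) (pos : Nat) (sylls : List String) (t : List Char)
    (hdropV3 : cv.toList.drop (pos + 3) = 'V' :: t) :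
    finishA cv
      (if cv.toList.length ≤ countC cv.toList (pos + 3) then
        Sum.inl (sylls ++ [if min 2 (countC cv.toList (pos + 3) - (pos + 3)) = 1 then "CVV" ++ "C"
          else if min 2 (countC cv.toList (pos + 3) - (pos + 3)) = 2 then "CVV" ++ "CC" else "CVV"])
      else
        loopA cv.toList ((pos + 3) + min 2 (countC cv.toList (pos + 3) - (pos + 3) - 1))
          (sylls ++ [if min 2 (countC cv.toList (pos + 3) - (pos + 3) - 1) = 1 then "CVV" ++ "C"
            else if min 2 (countC cv.toList (pos + 3) - (pos + 3) - 1) = 2 then "CVV" ++ "CC" else "CVV"]))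
    = (none, some ("illegal_cv_sequence_at:" ++ toString (pos + 3))) := by
  obtain ⟨hlt3, hgd3, -⟩ := dropCons hdropV3
  have hc : countC cv.toList (pos + 3) = pos + 3 := by
    have h0 := countC_spec 0 (pos + 3) ('V' :: t) (by simpa using hdropV3)
      (Or.inr ⟨'V', t, rfl, by decide⟩)
    simpa using h0
  have hnle : ¬ cv.toList.length ≤ pos + 3 := by omega
  rw [hc, if_neg hnle]
  rw [show min 2 (pos + 3 - (pos + 3) - 1) = 0 from by omega]
  norm_num
  have hcnd : cv.toList.length ≤ pos + 3 + 1 ∨ ¬cv.toList.getD (pos + 3) ' ' = 'C'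
      ∨ ¬cv.toList.getD (pos + 3 + 1) ' ' = 'V' :=
    Or.inr (Or.inl (by rw [hgd3]; decide))
  rw [loopA.eq_def, dif_pos hlt3, if_pos hcnd]
  simp [finishA]

-- one syllable step: after the onset 'C' and the nucleus (m V's, m ∈ {1,2}) are identified, A's
-- coda scan plus break/post-check equals B's treatment of the following run.
theorem codaStep (cv : String) (n pos m cStart : Nat) (sylls : List String)
    (rest2 : List (Char × Nat)) (syllS : String)
    (IH : IHtype cv n)
    (hn : cv.toList.length - pos = n)
    (hcs : cStart = pos + 1 + m)
    (hm12 : m = 1 ∨ m = 2)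
    (hSyl : syllS.toList = 'C' :: List.replicate m 'V')
    (hv2 : ValidR rest2)
    (hdrop : cv.toList.drop pos = ('C' :: List.replicate m 'V') ++ expandR rest2)
    (hJ : (sylls.map String.toList).flatten = cv.toList.take pos) :
    finishA cv
      (if cv.toList.length ≤ countC cv.toList cStart then
        Sum.inl (sylls ++ [if min 2 (countC cv.toList cStart - cStart) = 1 then syllS ++ "C"
          else if min 2 (countC cv.toList cStart - cStart) = 2 then syllS ++ "CC" else syllS])
      else
        loopA cv.toList (cStart + min 2 (countC cv.toList cStart - cStart - 1))
          (sylls ++ [if min 2 (countC cv.toList cStart - cStart - 1) = 1 then syllS ++ "C"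
            else if min 2 (countC cv.toList cStart - cStart - 1) = 2 then syllS ++ "CC" else syllS]))
    = loopB (('C', 1) :: ('V', m) :: rest2) pos sylls := by
  subst hcs
  have hm2' : ¬ 2 < m := by rcases hm12 with rfl | rfl <;> norm_num
  have hBc : ¬(¬('C' : Char) = 'C' ∨ ¬(1 : Nat) = 1 ∨ ¬('V' : Char) = 'V') := by simp
  have hCC : ¬¬('C' : Char) = 'C' := by simp
  have hdrop' : cv.toList.drop pos = 'C' :: (List.replicate m 'V' ++ expandR rest2) := by
    simpa using hdrop
  obtain ⟨hposlt, -, -⟩ := dropCons hdrop'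
  have hdropCS : cv.toList.drop (pos + 1 + m) = expandR rest2 := by
    have h1 := @List.drop_drop Char (1 + m) pos cv.toList
    rw [hdrop] at h1
    rw [show pos + 1 + m = pos + (1 + m) from by omega, ← h1]
    have hlu : ('C' :: List.replicate m 'V').length = 1 + m := by simp [Nat.add_comm]
    rw [← hlu, List.drop_left]
  have hJCS : ((sylls ++ [syllS]).map String.toList).flatten = cv.toList.take (pos + 1 + m) := by
    rw [flattenSnoc, hJ, hSyl]
    have h := takeOfDrop hdrop
    simp only [List.length_cons, List.length_replicate] at h
    rw [show pos + 1 + m = pos + (m + 1) from by omega, h]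
  have hsB : syllS = "C" ++ String.ofList (List.replicate m 'V') := by
    apply String.toList_inj.mp
    simp [hSyl, toListC]
  cases rest2 with
  | nil =>
    have hnil : cv.toList.drop (pos + 1 + m) = [] := by rw [hdropCS]; simp [expandR]
    have hlenle : cv.toList.length ≤ pos + 1 + m := List.drop_eq_nil_iff.mp hnil
    have hc : countC cv.toList (pos + 1 + m) = pos + 1 + m := by
      have h0 := countC_spec 0 (pos + 1 + m) [] (by simpa using hnil) (Or.inl rfl)
      simpa using h0
    rw [hc, if_pos hlenle]
    rw [show min 2 (pos + 1 + m - (pos + 1 + m)) = 0 from by omega]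
    norm_num
    have hceq : PySem.Str.join "" (sylls ++ [syllS]) = cv := by
      apply String.toList_inj.mp
      rw [joinToList, hJCS]
      exact List.take_of_length_le hlenle
    rw [loopB.eq_def]
    dsimp only
    try rw [if_neg hBc]
    try rw [if_neg hm2']
    simp [finishA, hceq, ← hsB]
  | cons r rest3 =>
    obtain ⟨nch, nk⟩ := r
    have hnk1 : 1 ≤ nk := hv2.1
    have hE2 : expandR ((nch, nk) :: rest3) = List.replicate nk nch ++ expandR rest3 :=
      expandR_cons _ _ _
    by_cases hnch : nch = 'C'
    · subst hnch
      have hdropE : cv.toList.drop (pos + 1 + m) = List.replicate nk 'C' ++ expandR rest3 := by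
        rw [hdropCS, hE2]
      cases rest3 with
      | nil =>
        have hdCS : cv.toList.drop (pos + 1 + m) = List.replicate nk 'C' := by
          rw [hdropE]; simp [expandR]
        have hc : countC cv.toList (pos + 1 + m) = pos + 1 + m + nk :=
          countC_spec nk (pos + 1 + m) [] (by simpa using hdCS) (Or.inl rfl)
        have hlen : cv.toList.length = pos + 1 + m + nk := by
          have hl : (cv.toList.drop (pos + 1 + m)).length = cv.toList.length - (pos + 1 + m) :=
            List.length_drop
          rw [hdCS, List.length_replicate] at hl
          omega
        rw [hc, if_pos (by omega)]
        rw [show pos + 1 + m + nk - (pos + 1 + m) = nk from by omega]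
        rw [loopB.eq_def]
        dsimp only
        try rw [if_neg hBc]
        try rw [if_neg hm2']
        try rw [if_neg hCC]
        try dsimp only
        by_cases hbig : 2 < nk
        · -- trailing consonant run longer than 2: A fails the full-consumption check
          rw [show min 2 nk = 2 from by omega]
          norm_num
          rw [if_pos hbig]
          have hsplit : List.replicate nk 'C' = ['C', 'C'] ++ List.replicate (nk - 2) 'C' := by
            have h2 : List.replicate nk 'C' = List.replicate 2 'C' ++ List.replicate (nk - 2) 'C' := by
              rw [← List.replicate_add]; congr 1; omega
            simpa using h2
          have hdropU : cv.toList.drop pos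
              = ('C' :: (List.replicate m 'V' ++ ['C', 'C'])) ++ List.replicate (nk - 2) 'C' := by
            rw [hdrop', show expandR [('C', nk)] = List.replicate nk 'C' from by simp [expandR],
              hsplit]
            simp only [List.cons_append, List.append_assoc]
          have htake := takeOfDrop hdropU
          simp only [List.length_cons, List.length_append, List.length_replicate,
            List.length_nil] at htake
          have h' : cv.toList.take (pos + m + 3)
              = cv.toList.take pos ++ ('C' :: (List.replicate m 'V' ++ ['C', 'C'])) := by
            convert htake using 2 <;> omega
          have hconsTL : (PySem.Str.join "" (sylls ++ [syllS ++ "CC"])).toList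
              = cv.toList.take (pos + m + 3) := by
            rw [joinToList, flattenSnoc, hJ, String.toList_append, hSyl, toListCC, h']
            simp
          have hlenTL : (PySem.Str.join "" (sylls ++ [syllS ++ "CC"])).toList.length
              = pos + m + 3 := by
            rw [hconsTL, List.length_take]
            omega
          have hne : PySem.Str.join "" (sylls ++ [syllS ++ "CC"]) ≠ cv := by
            intro heq
            have h1 := congrArg String.toList heq
            have h2 := congrArg List.length h1
            rw [hlenTL] at h2
            omega
          simp only [finishA]
          rw [if_pos hne]
          have hslice : PySem.Str.slice cv
              (some (PySem.Str.len (PySem.Str.join "" (sylls ++ [syllS ++ "CC"])))) none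
              = String.ofList (List.replicate (nk - 2) 'C') := by
            apply String.toList_inj.mp
            rw [PySem.Str.toList_slice, PySem.Chars.slice_eq_listSlice, PySem.Str.len_eq, hlenTL,
              PySem.List.slice_from_natCast, String.toList_ofList]
            have h1 := @List.drop_drop Char (m + 3) pos cv.toList
            rw [hdropU] at h1
            rw [show pos + m + 3 = pos + (m + 3) from by omega, ← h1]
            have hlu : ('C' :: (List.replicate m 'V' ++ ['C', 'C'])).length = m + 3 := by
              simp
            rw [← hlu, List.drop_left]
          rw [hslice]
        · rw [if_neg hbig]
          rw [show min 2 nk = nk from by omega]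
          have hsyl2 : (if nk = 1 then syllS ++ "C" else if nk = 2 then syllS ++ "CC" else syllS)
              = syllS ++ String.ofList (List.replicate nk 'C') := by
            rcases (show nk = 1 ∨ nk = 2 from by omega) with rfl | rfl <;>
              apply String.toList_inj.mp <;> simp [toListC, toListCC]
          rw [hsyl2]
          have hdropU2 : cv.toList.drop pos
              = ('C' :: (List.replicate m 'V' ++ List.replicate nk 'C')) ++ [] := by
            rw [hdrop', show expandR [('C', nk)] = List.replicate nk 'C' from by simp [expandR]]
            simp only [List.cons_append, List.append_assoc, List.append_nil]
          have htake := takeOfDrop hdropU2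
          simp only [List.length_cons, List.length_append, List.length_replicate] at htake
          have hceq : PySem.Str.join "" (sylls ++ [syllS ++ String.ofList (List.replicate nk 'C')])
              = cv := by
            apply String.toList_inj.mp
            rw [joinToList, flattenSnoc, hJ, String.toList_append, hSyl, String.toList_ofList]
            have h' : cv.toList.take (cv.toList.length)
                = cv.toList.take pos ++ ('C' :: (List.replicate m 'V' ++ List.replicate nk 'C')) := by
              convert htake using 2 <;> omega
            rw [List.take_length] at h'
            conv_rhs => rw [h']
            simp
          simp [finishA, hceq, ← hsB]
      | cons r4 rest4 =>
        obtain ⟨c4, k4⟩ := r4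
        have hk4 : 1 ≤ k4 := hv2.2.2.1
        have hne4 : ('C' : Char) ≠ c4 := by simpa using hv2.2.1 (c4, k4) (by simp)
        have hshape : cv.toList.drop (pos + 1 + m)
            = List.replicate nk 'C' ++ (c4 :: (List.replicate (k4 - 1) c4 ++ expandR rest4)) := by
          rw [hdropE, expandR_cons, repl_succ_pred hk4]
          simp only [List.cons_append, List.append_assoc]
        have hc : countC cv.toList (pos + 1 + m) = pos + 1 + m + nk :=
          countC_spec nk (pos + 1 + m) _ hshape (Or.inr ⟨c4, _, rfl, fun h => hne4 h.symm⟩)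
        have hltI : pos + 1 + m + nk < cv.toList.length := by
          have hl : (cv.toList.drop (pos + 1 + m)).length = cv.toList.length - (pos + 1 + m) :=
            List.length_drop
          rw [hshape] at hl
          simp only [List.length_append, List.length_replicate, List.length_cons] at hl
          omega
        rw [hc, if_neg (by omega)]
        rw [show pos + 1 + m + nk - (pos + 1 + m) - 1 = nk - 1 from by omega]
        have hsylC : (if min 2 (nk - 1) = 1 then syllS ++ "C"
              else if min 2 (nk - 1) = 2 then syllS ++ "CC" else syllS)
            = syllS ++ String.ofList (List.replicate (min 2 (nk - 1)) 'C') := by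
          rcases (show min 2 (nk - 1) = 0 ∨ min 2 (nk - 1) = 1 ∨ min 2 (nk - 1) = 2 from by omega)
            with h0 | h0 | h0 <;> rw [h0] <;>
            apply String.toList_inj.mp <;> simp [toListC, toListCC]
        rw [hsylC]
        have hv' : ValidR (('C', nk - min 2 (nk - 1)) :: (c4, k4) :: rest4) := by
          refine ⟨by omega, ?_, hv2.2.2⟩
          intro r2 hr2
          simp only [List.head?_cons, Option.mem_def, Option.some.injEq] at hr2
          rw [← hr2]
          simpa using hne4
        have hcdle : min 2 (nk - 1) ≤ (List.replicate nk 'C').length := by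
          rw [List.length_replicate]; omega
        have hE' : expandR (('C', nk - min 2 (nk - 1)) :: (c4, k4) :: rest4)
            = cv.toList.drop (pos + 1 + m + min 2 (nk - 1)) := by
          rw [expandR_cons]
          have h1 := @List.drop_drop Char (min 2 (nk - 1)) (pos + 1 + m) cv.toList
          rw [hdropE] at h1
          rw [← h1, List.drop_append_of_le_length hcdle, List.drop_replicate]
        have hJ' : ((sylls ++ [syllS ++ String.ofList (List.replicate (min 2 (nk - 1)) 'C')]).map
              String.toList).flatten
            = cv.toList.take (pos + 1 + m + min 2 (nk - 1)) := by
          rw [flattenSnoc, hJ, String.toList_append, hSyl, String.toList_ofList]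
          have hdropU3 : cv.toList.drop pos
              = ('C' :: (List.replicate m 'V' ++ List.replicate (min 2 (nk - 1)) 'C'))
                ++ (List.replicate (nk - min 2 (nk - 1)) 'C' ++ expandR ((c4, k4) :: rest4)) := by
            rw [hdrop', hE2, show List.replicate nk 'C'
                = List.replicate (min 2 (nk - 1)) 'C' ++ List.replicate (nk - min 2 (nk - 1)) 'C'
              from by rw [← List.replicate_add]; congr 1; omega]
            simp only [List.cons_append, List.append_assoc]
          have htake := takeOfDrop hdropU3
          simp only [List.length_cons, List.length_append, List.length_replicate] at htake
          have h' : cv.toList.take (pos + 1 + m + min 2 (nk - 1))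
              = cv.toList.take pos
                ++ ('C' :: (List.replicate m 'V' ++ List.replicate (min 2 (nk - 1)) 'C')) := by
            convert htake using 2 <;> omega
          rw [h']
          simp
        rw [loopB.eq_def]
        dsimp only
        try rw [if_neg hBc]
        try rw [if_neg hm2']
        try rw [if_neg hCC]
        try dsimp only
        rw [← hsB]
        exact IH (cv.toList.length - (pos + 1 + m + min 2 (nk - 1))) (by omega)
          (pos + 1 + m + min 2 (nk - 1))
          (sylls ++ [syllS ++ String.ofList (List.replicate (min 2 (nk - 1)) 'C')])
          (('C', nk - min 2 (nk - 1)) :: (c4, k4) :: rest4) rfl hv' hE' hJ'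
    · -- the run after the nucleus is not a consonant run: empty coda, A simply loops on
      have hshape : cv.toList.drop (pos + 1 + m)
          = List.replicate 0 'C' ++ (nch :: (List.replicate (nk - 1) nch ++ expandR rest3)) := by
        rw [hdropCS, hE2, repl_succ_pred hnk1]
        simp only [List.cons_append, List.append_assoc, List.replicate, List.nil_append]
      have hc : countC cv.toList (pos + 1 + m) = pos + 1 + m := by
        have h0 := countC_spec 0 (pos + 1 + m) _ hshape (Or.inr ⟨nch, _, rfl, hnch⟩)
        simpa using h0
      have hlt : pos + 1 + m < cv.toList.length := by
        have h1 : cv.toList.drop (pos + 1 + m) ≠ [] := by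
          rw [hshape]; simp
        by_contra hcon
        exact h1 (List.drop_eq_nil_iff.mpr (by omega))
      rw [hc, if_neg (by omega)]
      rw [show min 2 (pos + 1 + m - (pos + 1 + m) - 1) = 0 from by omega]
      norm_num
      rw [loopB.eq_def]
      dsimp only
      try rw [if_neg hBc]
      try rw [if_neg hm2']
      try dsimp only
      rw [if_pos hnch]
      rw [← hsB]
      exact IH (cv.toList.length - (pos + 1 + m)) (by omega) (pos + 1 + m) (sylls ++ [syllS])
        ((nch, nk) :: rest3) rfl hv2 hdropCS.symm hJCS

-- the main invariant: with R a well-formed run list expanding to the unread suffix and sylls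
-- spelling exactly the consumed prefix, A's loop (plus A's post-check) equals B's loop.
theorem mainA (cv : String) :
    ∀ n pos sylls R, cv.toList.length - pos = n → ValidR R →
      expandR R = cv.toList.drop pos →
      (sylls.map String.toList).flatten = cv.toList.take pos →
      finishA cv (loopA cv.toList pos sylls) = loopB R pos sylls := by
  intro n
  induction n using Nat.strong_induction_on with
  | _ n IH =>
    intro pos sylls R hn hv hE hJ
    cases R with
    | nil =>
      have hnil : cv.toList.drop pos = [] := by rw [← hE]; simp [expandR]
      have hge := List.drop_eq_nil_iff.mp hnil
      have hnlt : ¬ pos < cv.toList.length := by omega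
      rw [loopA.eq_def, dif_neg hnlt]
      have hceq : PySem.Str.join "" sylls = cv := by
        apply String.toList_inj.mp
        rw [joinToList, hJ]
        exact List.take_of_length_le hge
      rw [loopB.eq_def]
      simp [finishA, hceq]
    | cons r rest =>
      obtain ⟨ch, k⟩ := r
      have hk : 1 ≤ k := hv.1
      have hE1 : cv.toList.drop pos = ch :: (List.replicate (k - 1) ch ++ expandR rest) := by
        rw [← hE, expandR_cons, repl_succ_pred hk]
        simp
      obtain ⟨hpos, hgd, hdrop1⟩ := dropCons hE1
      cases rest with
      | nil =>
        rw [loopB.eq_def]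
        dsimp only
        have hdrop1' : cv.toList.drop (pos + 1) = List.replicate (k - 1) ch := by
          simpa [expandR] using hdrop1
        have hcond : cv.toList.length ≤ pos + 1 ∨ ¬cv.toList.getD pos ' ' = 'C'
            ∨ ¬cv.toList.getD (pos + 1) ' ' = 'V' := by
          by_cases hch : ch = 'C'
          · subst hch
            rcases Nat.lt_or_ge 1 k with hk2 | hk2
            · have h2 : cv.toList.drop (pos + 1) = 'C' :: List.replicate (k - 2) 'C' := by
                rw [hdrop1', show k - 1 = (k - 2) + 1 from by omega, List.replicate_succ]
              obtain ⟨-, hg2, -⟩ := dropCons h2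
              exact Or.inr (Or.inr (by rw [hg2]; decide))
            · have hx : cv.toList.drop (pos + 1) = [] := by
                rw [hdrop1', show k - 1 = 0 from by omega]
                rfl
              exact Or.inl (by have := List.drop_eq_nil_iff.mp hx; omega)
          · exact Or.inr (Or.inl (by rw [hgd]; exact hch))
        rw [loopA.eq_def, dif_pos hpos, if_pos hcond]
        simp [finishA]
      | cons r2 rest2 =>
        obtain ⟨v, m⟩ := r2
        have hm : 1 ≤ m := hv.2.2.1
        have hchv : ch ≠ v := by simpa using hv.2.1 (v, m) (by simp)
        have hdropM : cv.toList.drop (pos + 1)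
            = List.replicate (k - 1) ch ++ (v :: (List.replicate (m - 1) v ++ expandR rest2)) := by
          rw [hdrop1, expandR_cons, repl_succ_pred hm]
          simp only [List.cons_append, List.append_assoc]
        by_cases hgood : ch = 'C' ∧ k = 1 ∧ v = 'V'
        · obtain ⟨rfl, hk1, rfl⟩ := hgood
          subst hk1
          have hdropV : cv.toList.drop (pos + 1)
              = 'V' :: (List.replicate (m - 1) 'V' ++ expandR rest2) := by
            simpa using hdropM
          obtain ⟨hpos1, hgd1, hdrop2⟩ := dropCons hdropV
          have hcondA : ¬(cv.toList.length ≤ pos + 1 ∨ ¬cv.toList.getD pos ' ' = 'C'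
              ∨ ¬cv.toList.getD (pos + 1) ' ' = 'V') := by
            push_neg
            exact ⟨by omega, hgd, hgd1⟩
          rw [loopA.eq_def, dif_pos hpos, if_neg hcondA]
          by_cases hm2 : 2 < m
          · have hBc : ¬(¬('C' : Char) = 'C' ∨ ¬(1 : Nat) = 1 ∨ ¬('V' : Char) = 'V') := by simp
            rw [loopB.eq_def]
            dsimp only
            try rw [if_neg hBc]
            rw [if_pos hm2]
            have hddV2 : cv.toList.drop (pos + 2)
                = 'V' :: (List.replicate (m - 2) 'V' ++ expandR rest2) := by
              rw [show pos + 2 = pos + 1 + 1 from by omega, hdrop2,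
                show m - 1 = (m - 2) + 1 from by omega, List.replicate_succ]
              simp only [List.cons_append, List.append_assoc]
            obtain ⟨hpos2, hgd2, hdrop3⟩ := dropCons hddV2
            rw [if_pos (⟨hpos2, hgd2⟩ : _ ∧ _), if_pos (⟨hpos2, hgd2⟩ : _ ∧ _)]
            have hddV3 : cv.toList.drop (pos + 3)
                = 'V' :: (List.replicate (m - 3) 'V' ++ expandR rest2) := by
              rw [show pos + 3 = pos + 2 + 1 from by omega, hdrop3,
                show m - 2 = (m - 3) + 1 from by omega, List.replicate_succ]
              simp only [List.cons_append, List.append_assoc]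
            exact thirdV cv pos sylls _ hddV3
          · rcases (show m = 1 ∨ m = 2 from by omega) with rfl | rfl
            · have hd2 : cv.toList.drop (pos + 2) = expandR rest2 := by
                rw [show pos + 2 = pos + 1 + 1 from by omega]
                simpa using hdrop2
              have hnucF : ¬(pos + 2 < cv.toList.length
                  ∧ cv.toList.getD (pos + 2) ' ' = 'V') := by
                cases rest2 with
                | nil =>
                  intro hcon
                  have hx : cv.toList.drop (pos + 2) = [] := by rw [hd2]; simp [expandR]
                  have := List.drop_eq_nil_iff.mp hx
                  omega
                | cons r5 rest5 =>
                  obtain ⟨c5, k5⟩ := r5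
                  have hk5 : 1 ≤ k5 := hv.2.2.2.2.1
                  have hne5 : ('V' : Char) ≠ c5 := by simpa using hv.2.2.2.1 (c5, k5) (by simp)
                  have hdd : cv.toList.drop (pos + 2)
                      = c5 :: (List.replicate (k5 - 1) c5 ++ expandR rest5) := by
                    rw [hd2, expandR_cons, repl_succ_pred hk5]
                    simp only [List.cons_append, List.append_assoc]
                  obtain ⟨-, hg5, -⟩ := dropCons hdd
                  intro hcon
                  rw [hg5] at hcon
                  exact hne5 hcon.2.symm
              rw [if_neg hnucF, if_neg hnucF]
              exact codaStep cv n pos 1 (pos + 2) sylls rest2 "CV" IH hn (by omega) (Or.inl rfl)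
                (by decide) hv.2.2.2.2 (by rw [hE1]; simp [expandR_cons]) hJ
            · have hdd : cv.toList.drop (pos + 2) = 'V' :: expandR rest2 := by
                rw [show pos + 2 = pos + 1 + 1 from by omega]
                simpa using hdrop2
              obtain ⟨hpos2, hgd2, -⟩ := dropCons hdd
              rw [if_pos (⟨hpos2, hgd2⟩ : _ ∧ _), if_pos (⟨hpos2, hgd2⟩ : _ ∧ _)]
              exact codaStep cv n pos 2 (pos + 3) sylls rest2 "CVV" IH hn (by omega) (Or.inr rfl)
                (by decide) hv.2.2.2.2 (by rw [hE1]; simp [expandR_cons]) hJ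
        · have hbad : ¬ch = 'C' ∨ ¬k = 1 ∨ ¬v = 'V' := by tauto
          rw [loopB.eq_def]
          dsimp only
          rw [if_pos hbad]
          have hcond : cv.toList.length ≤ pos + 1 ∨ ¬cv.toList.getD pos ' ' = 'C'
              ∨ ¬cv.toList.getD (pos + 1) ' ' = 'V' := by
            by_cases hch : ch = 'C'
            · subst hch
              by_cases hk1 : k = 1
              · have hvV : ¬ v = 'V' := by tauto
                have h2 : cv.toList.drop (pos + 1)
                    = v :: (List.replicate (m - 1) v ++ expandR rest2) := by
                  rw [hdropM, show k - 1 = 0 from by omega]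
                  simp
                obtain ⟨-, hg2, -⟩ := dropCons h2
                exact Or.inr (Or.inr (by rw [hg2]; exact hvV))
              · have h2 : cv.toList.drop (pos + 1) = 'C' :: (List.replicate (k - 2) 'C'
                    ++ (v :: (List.replicate (m - 1) v ++ expandR rest2))) := by
                  rw [hdropM, show k - 1 = (k - 2) + 1 from by omega, List.replicate_succ]
                  simp only [List.cons_append, List.append_assoc]
                obtain ⟨-, hg2, -⟩ := dropCons h2
                exact Or.inr (Or.inr (by rw [hg2]; decide))
            · exact Or.inr (Or.inl (by rw [hgd]; exact hch))
          rw [loopA.eq_def, dif_pos hpos, if_pos hcond]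
          simp [finishA]

-- ===== VERDICT (by name: the statement is the Claim_ definition above) =====
theorem segment_cv_strict_spec : Claim_equal_segment_cv_strict := by
  intro cv _
  unfold Spec_segment_cv_strict segment_cv_strict segment_cv_strict_alt
  by_cases h : cv = ""
  · rw [if_pos h, if_pos h]
  · rw [if_neg h, if_neg h]
    exact mainA cv cv.toList.length 0 [] (rleB cv.toList) (by omega) (rleB_valid _)
      (by rw [rleB_expand]; simp) (by simp)
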